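-- pv_equiv track=rewrite | github.com/ttiagosilv/sem13T1T2 | sem-13-T2-Q2.py | aplicar_multiplicacao
-- ===== SOURCE A (Python) =====
-- def aplicar_multiplicacao(lista):
--     nova_lista = []
--     for i, valor in enumerate(lista):
--         if i % 2 == 0:
--             nova_lista.append(valor * 3)
--         else:
--             nova_lista.append(valor * 5)
--     return nova_lista
-- ===== SOURCE B (Python) =====
-- def aplicar_multiplicacao(lista):
--     # pairwise iteration: consume two elements per step, no parity test
--     out = []
--     i = 0
--     n = len(lista)
--     while i + 1 < n:
--         out.append(lista[i] * 3)
--         out.append(lista[i + 1] * 5)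
--         i += 2
--     if i < n:
--         out.append(lista[i] * 3)
--     return out
-- ===== Notes on version B (the rewrite author's own statement) =====
-- stated objective: alternative
-- what changed: Replaces the enumerate loop with an index/parity branch by a pairwise structural recursion that consumes two elements at a time, so no index and no parity test exist.
import Mathlib
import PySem

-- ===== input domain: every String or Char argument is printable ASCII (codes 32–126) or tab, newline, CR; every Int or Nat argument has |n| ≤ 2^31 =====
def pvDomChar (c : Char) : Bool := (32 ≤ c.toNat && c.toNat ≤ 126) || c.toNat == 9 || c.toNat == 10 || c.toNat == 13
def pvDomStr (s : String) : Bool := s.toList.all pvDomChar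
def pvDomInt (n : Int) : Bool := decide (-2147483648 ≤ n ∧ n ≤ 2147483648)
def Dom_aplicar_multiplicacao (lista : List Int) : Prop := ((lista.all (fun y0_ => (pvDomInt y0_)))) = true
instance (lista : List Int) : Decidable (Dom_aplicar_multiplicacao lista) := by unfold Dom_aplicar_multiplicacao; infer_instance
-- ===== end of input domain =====

-- B replaces A's enumerate loop with its parity branch by a pairwise pass consuming
-- two elements per step (objective: alternative decomposition, same cost).

-- ===== PORT A =====
-- for i, valor in enumerate(lista): if i % 2 == 0: append(valor*3) else: append(valor*5)
def aplicar_multiplicacao (lista : List Int) : List Int :=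
  (PySem.List.enumerate lista).foldl
    (fun nova_lista p =>
      if PySem.Int.mod p.1 2 == 0 then nova_lista ++ [p.2 * 3]
      else nova_lista ++ [p.2 * 5])
    []

-- ===== PORT B =====
-- the while loop of Source B: each iteration consumes lista[i], lista[i+1] and appends
-- [lista[i]*3, lista[i+1]*5] to out; the trailing 'if i < n' appends lista[i]*3.
def aplicarAltGo (out : List Int) : List Int → List Int
  | x :: y :: rest => aplicarAltGo (out ++ [x * 3, y * 5]) rest
  | [x] => out ++ [x * 3]
  | [] => out

def aplicar_multiplicacao_alt (lista : List Int) : List Int :=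
  aplicarAltGo [] lista

-- ===== PRECONDITION & SPEC =====
def Spec_aplicar_multiplicacao (lista : List Int) (out : List Int) : Prop := out = aplicar_multiplicacao_alt lista
instance (lista : List Int) (out : List Int) : Decidable (Spec_aplicar_multiplicacao lista out) := by unfold Spec_aplicar_multiplicacao; infer_instance

-- ===== CLAIM (what is proved, stated in full; the proofs are below) =====
def Claim_equal_aplicar_multiplicacao : Prop := ∀ (lista : List Int), Dom_aplicar_multiplicacao lista → Spec_aplicar_multiplicacao lista (aplicar_multiplicacao lista)

-- ===== LEMMAS AND PROOFS =====

theorem aplicar_key (out : List Int) (l : List Int) (s : Int) (hs : PySem.Int.mod s 2 = 0) :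
    (PySem.List.enumerate l s).foldl
      (fun nova_lista p =>
        if PySem.Int.mod p.1 2 == 0 then nova_lista ++ [p.2 * 3]
        else nova_lista ++ [p.2 * 5]) out = aplicarAltGo out l := by
  induction out, l using aplicarAltGo.induct generalizing s with
  | case1 out x y rest ih =>
    have hm : PySem.Int.mod s 2 = s % 2 := PySem.Int.mod_eq_emod_of_pos (by norm_num)
    have hm1 : PySem.Int.mod (s + 1) 2 = (s + 1) % 2 := PySem.Int.mod_eq_emod_of_pos (by norm_num)
    have hs0 : s % 2 = 0 := by omega
    have h1 : ¬ ((s + 1) % 2 = 0) := by omega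
    simp only [PySem.List.enumerate_cons, List.foldl_cons, hm, hm1, hs0, h1,
      beq_iff_eq, if_true, if_false]
    rw [aplicarAltGo]
    have := ih (s + 1 + 1) (by
      rw [PySem.Int.mod_eq_emod_of_pos (by norm_num)]; omega)
    simpa [List.append_assoc] using this
  | case2 out x =>
    have hm : PySem.Int.mod s 2 = s % 2 := PySem.Int.mod_eq_emod_of_pos (by norm_num)
    have hs0 : s % 2 = 0 := by omega
    simp [PySem.List.enumerate_cons, PySem.List.enumerate_nil, aplicarAltGo, hs0]
  | case3 out =>
    simp [PySem.List.enumerate_nil, aplicarAltGo]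

-- ===== VERDICT (by name: the statement is the Claim_ definition above) =====
theorem aplicar_multiplicacao_spec : Claim_equal_aplicar_multiplicacao := by
  intro lista _
  unfold Spec_aplicar_multiplicacao aplicar_multiplicacao aplicar_multiplicacao_alt
  exact aplicar_key [] lista 0 (by decide)
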